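-- pv_equiv track=rewrite | github.com/Dani3273-design/solo-5751 | kernel/game_logic.py | _compress_with_tracking
-- ===== SOURCE A (Python) =====
-- def _compress_with_tracking(row, row_idx, is_column=False, reverse=False):
--     non_zero = [(val, idx) for idx, val in enumerate(row) if val != 0]
--     result = [0] * 4
--     movements = []
--
--     for new_pos, (val, old_pos) in enumerate(non_zero):
--         result[new_pos] = val
--         if new_pos != old_pos:
--             if reverse:
--                 old_pos = 3 - old_pos
--                 new_pos = 3 - new_pos
--             if is_column:
--                 movements.append((old_pos, row_idx, new_pos, row_idx, val))
--             else:
--                 movements.append((row_idx, old_pos, row_idx, new_pos, val))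
--
--     return result, movements
-- ===== SOURCE B (Python) =====
-- def _compress_with_tracking(row, row_idx, is_column=False, reverse=False):
--     def place(pairs, w):
--         # recursively place the remaining non-zero (idx, val) pairs starting at slot w;
--         # the compacted values are built by consing on the way out of the recursion
--         if not pairs:
--             return [], []
--         i, v = pairs[0]
--         vals, moves = place(pairs[1:], w + 1)
--         if w != i:
--             old_pos, new_pos = (3 - i, 3 - w) if reverse else (i, w)
--             mv = (old_pos, row_idx, new_pos, row_idx, v) if is_column \
--                 else (row_idx, old_pos, row_idx, new_pos, v)
--             moves = [mv] + moves
--         return [v] + vals, moves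
--
--     vals, moves = place([(i, v) for i, v in enumerate(row) if v != 0], 0)
--     return (vals + [0, 0, 0, 0])[:4], moves
-- ===== Notes on version B (the rewrite author's own statement) =====
-- stated objective: alternative
-- what changed: Replaced A's imperative forward loop that mutates a preallocated [0]*4 result and appends movements by a recursion over the non-zero pairs that builds the compacted values by consing on the way out and prepends movements, then pads with zeros and truncates to 4; no indexed writes.
import Mathlib
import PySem

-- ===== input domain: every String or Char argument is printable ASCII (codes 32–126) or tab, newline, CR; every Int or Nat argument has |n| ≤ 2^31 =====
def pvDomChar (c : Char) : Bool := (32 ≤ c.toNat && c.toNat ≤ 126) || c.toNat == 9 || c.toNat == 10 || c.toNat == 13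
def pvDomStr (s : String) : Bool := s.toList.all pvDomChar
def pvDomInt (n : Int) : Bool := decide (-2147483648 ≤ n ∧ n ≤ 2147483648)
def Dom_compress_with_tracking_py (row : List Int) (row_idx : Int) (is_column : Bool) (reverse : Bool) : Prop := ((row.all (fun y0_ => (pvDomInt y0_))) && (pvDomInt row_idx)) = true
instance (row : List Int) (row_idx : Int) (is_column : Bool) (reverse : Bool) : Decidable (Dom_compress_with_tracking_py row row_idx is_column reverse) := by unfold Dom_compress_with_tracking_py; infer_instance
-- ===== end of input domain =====

-- B replaces A's imperative loop (mutating a preallocated [0]*4 via indexed writes,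
-- appending movements) by a recursion over the non-zero pairs that conses the
-- compacted values on the way out, then pads with zeros and truncates to 4.

-- ===== PORT A =====
-- step of A's 'for new_pos, (val, old_pos) in enumerate(non_zero)' loop
def stepA_cwt (row_idx : Int) (is_column reverse : Bool)
    (st : List Int × List (Int × Int × Int × Int × Int))
    (q : Int × Int × Int) : List Int × List (Int × Int × Int × Int × Int) :=
  let new_pos := q.1
  let val := q.2.1
  let old_pos := q.2.2
  let result := PySem.List.pySetD st.1 new_pos val
  if new_pos ≠ old_pos then
    let old_pos' := if reverse then 3 - old_pos else old_pos
    let new_pos' := if reverse then 3 - new_pos else new_pos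
    let mv := if is_column then (old_pos', row_idx, new_pos', row_idx, val)
              else (row_idx, old_pos', row_idx, new_pos', val)
    (result, st.2 ++ [mv])
  else (result, st.2)

def compress_with_tracking_py (row : List Int) (row_idx : Int) (is_column : Bool) (reverse : Bool) : List Int × (List (Int × Int × Int × Int × Int)) :=
  let non_zero : List (Int × Int) :=
    (PySem.List.enumerate row).filterMap
      (fun p => if p.2 ≠ 0 then some (p.2, p.1) else none)
  (PySem.List.enumerate non_zero).foldl (stepA_cwt row_idx is_column reverse)
    ([0, 0, 0, 0], [])

-- ===== PORT B =====
-- B's recursive 'place(pairs, w)': cons values on the way out, prepend movements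
def placeB_cwt (row_idx : Int) (is_column reverse : Bool) :
    List (Int × Int) → Int → List Int × List (Int × Int × Int × Int × Int)
  | [], _ => ([], [])
  | (i, v) :: rest, w =>
    let pr := placeB_cwt row_idx is_column reverse rest (w + 1)
    let moves :=
      if w ≠ i then
        let old_pos := if reverse then 3 - i else i
        let new_pos := if reverse then 3 - w else w
        let mv := if is_column then (old_pos, row_idx, new_pos, row_idx, v)
                  else (row_idx, old_pos, row_idx, new_pos, v)
        mv :: pr.2
      else pr.2
    (v :: pr.1, moves)

def compress_with_tracking_py_alt (row : List Int) (row_idx : Int) (is_column : Bool) (reverse : Bool) : List Int × (List (Int × Int × Int × Int × Int)) :=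
  let pairs : List (Int × Int) :=
    (PySem.List.enumerate row).filterMap
      (fun p => if p.2 ≠ 0 then some p else none)
  let r := placeB_cwt row_idx is_column reverse pairs 0
  ((r.1 ++ [0, 0, 0, 0]).take 4, r.2)

-- ===== PRECONDITION & SPEC =====
-- Pre_ excludes rows with more than four non-zero entries, on which the Python A
-- raises IndexError (result = [0]*4).
def Pre_compress_with_tracking_py (row : List Int) (row_idx : Int) (is_column : Bool) (reverse : Bool) : Prop :=
  (row.filter (fun v => v ≠ 0)).length ≤ 4
instance (row : List Int) (row_idx : Int) (is_column : Bool) (reverse : Bool) : Decidable (Pre_compress_with_tracking_py row row_idx is_column reverse) := by unfold Pre_compress_with_tracking_py; infer_instance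

def pvWitness_compress_with_tracking_py : List Int × Int × Bool × Bool := ([2, 0, 2, 4], 1, false, false)

def Spec_compress_with_tracking_py (row : List Int) (row_idx : Int) (is_column : Bool) (reverse : Bool) (out : List Int × (List (Int × Int × Int × Int × Int))) : Prop := out = compress_with_tracking_py_alt row row_idx is_column reverse
instance (row : List Int) (row_idx : Int) (is_column : Bool) (reverse : Bool) (out : List Int × (List (Int × Int × Int × Int × Int))) : Decidable (Spec_compress_with_tracking_py row row_idx is_column reverse out) := by unfold Spec_compress_with_tracking_py; infer_instance

-- ===== CLAIM (what is proved, stated in full; the proofs are below) =====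
def Claim_equal_compress_with_tracking_py : Prop := ∀ (row : List Int) (row_idx : Int) (is_column : Bool) (reverse : Bool), Dom_compress_with_tracking_py row row_idx is_column reverse → Pre_compress_with_tracking_py row row_idx is_column reverse → Spec_compress_with_tracking_py row row_idx is_column reverse (compress_with_tracking_py row row_idx is_column reverse)

-- ===== LEMMAS AND PROOFS =====

-- sequential placement of values at slots w, w+1, …, as A's loop performs it
def placeVals_cwt : List Int → Int → List Int → List Int
  | r, _, [] => r
  | r, w, v :: vs => placeVals_cwt (PySem.List.pySetD r w v) (w + 1) vs

-- A's non_zero list is the swap of B's pairs list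
theorem nz_swap_cwt (row : List Int) (s : Int) :
    (PySem.List.enumerate row s).filterMap
        (fun p => if p.2 ≠ 0 then some (p.2, p.1) else none)
    = ((PySem.List.enumerate row s).filterMap
        (fun p => if p.2 ≠ 0 then some p else none)).map (fun p => (p.2, p.1)) := by
  rw [List.map_filterMap]
  congr 1
  funext p
  by_cases h : p.2 = 0 <;> simp [h]

-- B's pairs have as many elements as A's filtered row
theorem pairs_len_cwt (row : List Int) (s : Int) :
    ((PySem.List.enumerate row s).filterMap
        (fun p => if p.2 ≠ 0 then some p else none)).length
    = (row.filter (fun v => v ≠ 0)).length := by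
  induction row generalizing s with
  | nil => simp [PySem.List.enumerate_nil]
  | cons x xs ih =>
    rw [PySem.List.enumerate_cons]
    by_cases h : x = 0 <;> simp [h] <;> simpa using ih (s + 1)

-- A's fold over the enumerated swapped pairs = sequential placement + B's recursion
theorem foldA_char_cwt (row_idx : Int) (is_column reverse : Bool) :
    ∀ (pairs : List (Int × Int)) (w : Int) (r : List Int)
      (m : List (Int × Int × Int × Int × Int)),
    (PySem.List.enumerate (pairs.map (fun p => (p.2, p.1))) w).foldl
        (stepA_cwt row_idx is_column reverse) (r, m)
    = (placeVals_cwt r w (pairs.map (fun p => p.2)),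
       m ++ (placeB_cwt row_idx is_column reverse pairs w).2) := by
  intro pairs
  induction pairs with
  | nil => intro w r m; simp [PySem.List.enumerate_nil, placeB_cwt, placeVals_cwt]
  | cons p rest ih =>
    intro w r m
    obtain ⟨i, v⟩ := p
    rw [List.map_cons, PySem.List.enumerate_cons, List.foldl_cons]
    simp only [stepA_cwt, placeB_cwt, List.map_cons]
    by_cases hw : w = i
    · simp only [hw, ne_eq, not_true_eq_false, if_false, ite_false]
      rw [ih]
      simp [placeVals_cwt, hw]
    · simp only [ne_eq, hw, not_false_eq_true, if_true, ite_true]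
      rw [ih]
      simp [placeVals_cwt, List.append_assoc]

-- B's consed value list is exactly the values of the pairs
theorem placeB_vals_cwt (row_idx : Int) (is_column reverse : Bool) :
    ∀ (pairs : List (Int × Int)) (w : Int),
    (placeB_cwt row_idx is_column reverse pairs w).1 = pairs.map (fun p => p.2) := by
  intro pairs
  induction pairs with
  | nil => intro w; simp [placeB_cwt]
  | cons p rest ih => intro w; obtain ⟨i, v⟩ := p; simp [placeB_cwt, ih]

-- with at most four values, sequential placement into [0,0,0,0] = pad-and-truncate
theorem placeVals4_cwt (vals : List Int) (h : vals.length ≤ 4) :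
    placeVals_cwt [0, 0, 0, 0] 0 vals = (vals ++ [0, 0, 0, 0]).take 4 := by
  match vals, h with
  | [], _ => rfl
  | [a], _ => simp [placeVals_cwt, PySem.List.pySetD_of_nonneg]
  | [a, b], _ => simp [placeVals_cwt, PySem.List.pySetD_of_nonneg]
  | [a, b, c], _ => simp [placeVals_cwt, PySem.List.pySetD_of_nonneg]
  | [a, b, c, d], _ => simp [placeVals_cwt, PySem.List.pySetD_of_nonneg]

-- ===== VERDICT (by name: the statement is the Claim_ definition above) =====
theorem compress_with_tracking_py_spec : Claim_equal_compress_with_tracking_py := by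
  intro row row_idx is_column reverse _ hpre
  unfold Spec_compress_with_tracking_py
  unfold Pre_compress_with_tracking_py at hpre
  unfold compress_with_tracking_py compress_with_tracking_py_alt
  simp only []
  rw [nz_swap_cwt, foldA_char_cwt, placeB_vals_cwt]
  rw [placeVals4_cwt]
  · simp
  · rw [List.length_map, pairs_len_cwt]; exact hpre
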